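/- GENERATED by tools/from_farm_form.py from prooffarm-gif/accepted/digest_map.E/Proof.lean (a worked proof of the farm's unit `digest_map.E`,
   accepted by the verdict) — do not edit. -/
import Gif.Spec.Units.digest_map_E
import Gif.Spec.AllSegs

open X86 X86.User Asan ProgX.Base ProgX.Base.Spec Gif.Spec

set_option maxRecDepth 4000
set_option maxHeartbeats 4000000

/-- Segment E of `digest_map` (105558H … the `ret` at 105563H; gif_driver.c:127): `mov rax, rbp`, the five pops (`rbx rbp r12 r13
r14`), `ret`: from `Done` (= `At` at the shared exit) to the contract's `Returned`. An epilogue WITHOUT a protected frame: the six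
loads (five saved registers, the return address) are given to the walker as facts, the `ret` is walked over, `Returned.mk` is
filled field by field: `saved` from the popped slots (`r15` was never written: `At.r15`), `same` is `At.same` (nothing is stored
here; the contract's footprint is the 64 bytes of stack), the post `ShadowUntouched` is `At.un`. -/
theorem Gif.Spec.Proved.digest_map_E_ok : Gif.Spec.digest_map_E.Statement := by
  intro Lay hLay μ hμ u₀ hcode H rest frames m e ret v hdone
  obtain ⟨hat⟩ := hdone
  -- 1. the entry state's facts
  have he := hat.entry
  v_entry he
  -- 2. the present state (105558H), in the walker's names
  have w_rip := hat.rip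
  have c_rsp : v.reg .rsp = e.reg .rsp - 40 := hat.rsp
  have c_r15 : v.reg .r15 = e.reg .r15 := hat.r15
  have w_eq : Mem.EqOn ProgX.Base.L.textLo ProgX.Base.L.textHi u₀.mem v.mem := ProgX.Base.conv_code_eqOn hat.code
  have hdf : v.flags .df = false := (show abiInv _ from hat.abi).1
  have hmx : v.mxcsr &&& 0x1F80 = 0x1F80 := (show abiInv _ from hat.abi).2
  have hsse := ProgX.Base.sseOK_of_abiInv hat.abi
  have w_kept : RegsKept [.rsp] v v := RegsKept.refl _ _
  -- 3. the six slots the epilogue loads, in the form the walker rewrites with (`UInt64.ofNat (readLE …) = the register`)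
  have k_rbx : UInt64.ofNat (v.mem.readLE (e.reg .rsp - 40) 8) = e.reg .rbx := by
    rw [hat.slot_rbx, UInt64.ofNat_toNat]
  have k_rbp : UInt64.ofNat (v.mem.readLE (e.reg .rsp - 32) 8) = e.reg .rbp := by
    rw [hat.slot_rbp, UInt64.ofNat_toNat]
  have k_r12 : UInt64.ofNat (v.mem.readLE (e.reg .rsp - 24) 8) = e.reg .r12 := by
    rw [hat.slot_r12, UInt64.ofNat_toNat]
  have k_r13 : UInt64.ofNat (v.mem.readLE (e.reg .rsp - 16) 8) = e.reg .r13 := by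
    rw [hat.slot_r13, UInt64.ofNat_toNat]
  have k_r14 : UInt64.ofNat (v.mem.readLE (e.reg .rsp - 8) 8) = e.reg .r14 := by
    rw [hat.slot_r14, UInt64.ofNat_toNat]
  have k_ra : UInt64.ofNat (v.mem.readLE (e.reg .rsp) 8) = ret := hat.slot_ra
  -- 4. the walk from 105558H, over the `ret` at 105563H
  u_walk hcode [hμ.vendor] span [ProgX.Base.L.textLo, ProgX.Base.L.textHi] side (v_side)
  -- the `ret` has been executed: the state is the caller's
  have habi : (conv u₀).inv s_105563 := by v_inv
  refine ReachVia.done ?_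
  refine X86.User.Returned.mk w_rip w_rsp ?_ ?_ (ProgX.Base.conv_code_in w_eq) habi ?_
  · -- saved: rbx, rbp, r12, r13, r14 popped back; r15 never written
    intro r hr
    cases r <;> first
      | exact absurd hr (by decide)
      | (with_reducible assumption)
      | (rw [w_kept.get .r15 rfl]; exact c_r15)
  · -- same: nothing was written since the cut; the contract's footprint is the 64 bytes of stack (`At.same`)
    simp only [X86.User.Spec.footprint, vspec]
    rw [w_mem]
    exact hat.same
  · -- the postcondition: no shadow byte was written (`At.un`)
    show ShadowUntouched e.mem s_105563.mem
    rw [w_mem]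
    exact hat.un
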